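-- pv_equiv track=rewrite | github.com/Bricesodini/transcript_whisper | transcribe-suite/src/diarize.py | _limit_speakers
-- ===== SOURCE A (Python) =====
-- from typing import Dict, List, Optional
--
-- def _limit_speakers(segments: List[Dict], max_speakers: int) -> List[Dict]:
--     if not segments or max_speakers <= 0:
--         return segments
--     template = "SPEAKER_{:02d}"
--     speaker_map: Dict[str, str] = {}
--     for seg in segments:
--         speaker = seg.get("speaker") or "unknown"
--         if speaker in speaker_map:
--             seg["speaker"] = speaker_map[speaker]
--             continue
--         if len(speaker_map) < max_speakers:
--             label = template.format(len(speaker_map))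
--             speaker_map[speaker] = label
--             seg["speaker"] = label
--         else:
--             seg["speaker"] = template.format(max_speakers - 1)
--     return segments
-- ===== SOURCE B (Python) =====
-- def _limit_speakers(segments, max_speakers):
--     if not segments or max_speakers <= 0:
--         return segments
--     template = "SPEAKER_{:02d}"
--     # pass 1: assign labels to the first max_speakers distinct (normalized) speakers
--     speaker_map = {}
--     for seg in segments:
--         speaker = seg.get("speaker") or "unknown"
--         if speaker not in speaker_map and len(speaker_map) < max_speakers:
--             speaker_map[speaker] = template.format(len(speaker_map))
--     # pass 2: relabel every segment, collapsing overflow speakers onto the last label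
--     fallback = template.format(max_speakers - 1)
--     for seg in segments:
--         seg["speaker"] = speaker_map.get(seg.get("speaker") or "unknown", fallback)
--     return segments
-- ===== Notes on version B (the rewrite author's own statement) =====
-- stated objective: simpler
-- what changed: Replaces A's single loop threading a map-and-output state machine with three branches by two plain passes: one that only builds the capped speaker map, and one map over the segments using a single getD with the fallback label as default.
import Mathlib
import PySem

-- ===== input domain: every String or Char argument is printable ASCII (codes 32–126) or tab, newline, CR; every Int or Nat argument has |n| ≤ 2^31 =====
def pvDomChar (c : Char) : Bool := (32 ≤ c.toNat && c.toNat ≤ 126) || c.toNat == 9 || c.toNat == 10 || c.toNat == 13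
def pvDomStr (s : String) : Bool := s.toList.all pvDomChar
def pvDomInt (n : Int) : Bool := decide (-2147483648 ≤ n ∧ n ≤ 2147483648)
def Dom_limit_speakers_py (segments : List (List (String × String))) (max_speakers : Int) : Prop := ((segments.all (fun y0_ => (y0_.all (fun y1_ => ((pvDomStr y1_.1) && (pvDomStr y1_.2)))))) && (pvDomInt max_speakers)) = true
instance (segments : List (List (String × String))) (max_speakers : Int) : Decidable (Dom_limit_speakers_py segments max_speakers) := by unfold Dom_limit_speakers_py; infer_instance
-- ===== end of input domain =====

-- B replaces A's single loop threading (map, output) state by two plain passes (build the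
-- capped map, then relabel); objective: simpler. Both Pythons mutate the segment dicts in
-- place; the equivalence proved here is about the returned value.

-- shared helpers: "SPEAKER_{:02d}".format(n), the 'seg.get("speaker") or "unknown"'
-- normalization, and the seg["speaker"] = v dict assignment (both sources do these identically)
def pvPad2 (s : String) : String :=
  if s.length < 2 then String.ofList (List.replicate (2 - s.length) '0') ++ s else s

def pvLabel (n : Int) : String := "SPEAKER_" ++ pvPad2 (PySem.Int.toStr n)

def pvNormSpeaker (seg : List (String × String)) : String :=
  match (PySem.Dict.mk seg).get? "speaker" with
  | some s => if s = "" then "unknown" else s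
  | none => "unknown"

def pvSetSpeaker (seg : List (String × String)) (v : String) : List (String × String) :=
  ((PySem.Dict.mk seg).insert "speaker" v).items

-- ===== PORT A =====
-- loop body of A: state = (speaker_map, output so far)
def pvAStep (max_speakers : Int)
    (st : PySem.Dict String String × List (List (String × String)))
    (seg : List (String × String)) :
    PySem.Dict String String × List (List (String × String)) :=
  let speaker := pvNormSpeaker seg
  match st.1.get? speaker with
  | some lbl => (st.1, st.2 ++ [pvSetSpeaker seg lbl])
  | none =>
    if (st.1.size : Int) < max_speakers then
      let label := pvLabel (st.1.size : Int)
      (st.1.insert speaker label, st.2 ++ [pvSetSpeaker seg label])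
    else
      (st.1, st.2 ++ [pvSetSpeaker seg (pvLabel (max_speakers - 1))])

def limit_speakers_py (segments : List (List (String × String))) (max_speakers : Int) : List (List (String × String)) :=
  if segments = [] ∨ max_speakers ≤ 0 then segments
  else (segments.foldl (pvAStep max_speakers) (PySem.Dict.empty, [])).2

-- ===== PORT B =====
-- pass-1 body of B: grow the capped speaker map only
def pvBStep (max_speakers : Int) (m : PySem.Dict String String)
    (seg : List (String × String)) : PySem.Dict String String :=
  let speaker := pvNormSpeaker seg
  if (m.get? speaker).isSome then m
  else if (m.size : Int) < max_speakers then m.insert speaker (pvLabel (m.size : Int))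
  else m

def limit_speakers_py_alt (segments : List (List (String × String))) (max_speakers : Int) : List (List (String × String)) :=
  if segments = [] ∨ max_speakers ≤ 0 then segments
  else
    let speaker_map := segments.foldl (pvBStep max_speakers) PySem.Dict.empty
    let fallback := pvLabel (max_speakers - 1)
    segments.map (fun seg => pvSetSpeaker seg (speaker_map.getD (pvNormSpeaker seg) fallback))

-- ===== PRECONDITION & SPEC =====
def Spec_limit_speakers_py (segments : List (List (String × String))) (max_speakers : Int) (out : List (List (String × String))) : Prop := out = limit_speakers_py_alt segments max_speakers
instance (segments : List (List (String × String))) (max_speakers : Int) (out : List (List (String × String))) : Decidable (Spec_limit_speakers_py segments max_speakers out) := by unfold Spec_limit_speakers_py; infer_instance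

-- ===== CLAIM (what is proved, stated in full; the proofs are below) =====
def Claim_equal_limit_speakers_py : Prop := ∀ (segments : List (List (String × String))) (max_speakers : Int), Dom_limit_speakers_py segments max_speakers → Spec_limit_speakers_py segments max_speakers (limit_speakers_py segments max_speakers)

-- ===== LEMMAS AND PROOFS =====

-- pass 1 only adds new keys: existing bindings survive
theorem pvGrow_get (max_speakers : Int) (segs : List (List (String × String)))
    (m : PySem.Dict String String) (k : String) (v : String)
    (h : m.get? k = some v) :
    (segs.foldl (pvBStep max_speakers) m).get? k = some v := by
  induction segs generalizing m with
  | nil => simpa using h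
  | cons seg rest ih =>
    simp only [List.foldl_cons]
    apply ih
    by_cases hs : (m.get? (pvNormSpeaker seg)).isSome = true
    · rw [show pvBStep max_speakers m seg = m from by simp [pvBStep, hs]]; exact h
    · by_cases hlt : (m.size : Int) < max_speakers
      · rw [show pvBStep max_speakers m seg
            = m.insert (pvNormSpeaker seg) (pvLabel (m.size : Int)) from by
          simp [pvBStep, hs, hlt]]
        have hne : k ≠ pvNormSpeaker seg := by
          intro e; subst e; simp [h] at hs
        simp [PySem.Dict.get?_insert, hne, h]
      · rw [show pvBStep max_speakers m seg = m from by simp [pvBStep, hs, hlt]]; exact h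

-- once the map is full, pass 1 leaves it unchanged
theorem pvGrow_full (max_speakers : Int) (segs : List (List (String × String)))
    (m : PySem.Dict String String) (h : ¬ (m.size : Int) < max_speakers) :
    segs.foldl (pvBStep max_speakers) m = m := by
  induction segs generalizing m with
  | nil => rfl
  | cons seg rest ih =>
    simp only [List.foldl_cons]
    rw [show pvBStep max_speakers m seg = m from by simp [pvBStep, h]]
    exact ih m h

-- main invariant: A's interleaved loop equals relabelling with the final map of pass 1
theorem pvLoop_eq (max_speakers : Int) (segs : List (List (String × String)))
    (m : PySem.Dict String String) (acc : List (List (String × String))) :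
    (segs.foldl (pvAStep max_speakers) (m, acc)).2 =
      acc ++ segs.map (fun seg =>
        pvSetSpeaker seg ((segs.foldl (pvBStep max_speakers) m).getD
          (pvNormSpeaker seg) (pvLabel (max_speakers - 1)))) := by
  induction segs generalizing m acc with
  | nil => simp
  | cons seg rest ih =>
    simp only [List.foldl_cons, List.map_cons]
    cases hget : m.get? (pvNormSpeaker seg) with
    | some lbl =>
      rw [show pvAStep max_speakers (m, acc) seg = (m, acc ++ [pvSetSpeaker seg lbl]) from by
            simp [pvAStep, hget],
          show pvBStep max_speakers m seg = m from by simp [pvBStep, hget],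
          ih]
      have hv : (rest.foldl (pvBStep max_speakers) m).get? (pvNormSpeaker seg) = some lbl :=
        pvGrow_get max_speakers rest m _ lbl hget
      simp [PySem.Dict.getD_eq_get?_getD, hv]
    | none =>
      by_cases hlt : (m.size : Int) < max_speakers
      · rw [show pvAStep max_speakers (m, acc) seg
              = (m.insert (pvNormSpeaker seg) (pvLabel (m.size : Int)),
                 acc ++ [pvSetSpeaker seg (pvLabel (m.size : Int))]) from by
            simp [pvAStep, hget, hlt],
            show pvBStep max_speakers m seg
              = m.insert (pvNormSpeaker seg) (pvLabel (m.size : Int)) from by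
            simp [pvBStep, hget, hlt],
            ih]
        have hv : (rest.foldl (pvBStep max_speakers)
              (m.insert (pvNormSpeaker seg) (pvLabel (m.size : Int)))).get?
              (pvNormSpeaker seg) = some (pvLabel (m.size : Int)) :=
          pvGrow_get max_speakers rest _ _ _ (by simp)
        simp [PySem.Dict.getD_eq_get?_getD, hv]
      · rw [show pvAStep max_speakers (m, acc) seg
              = (m, acc ++ [pvSetSpeaker seg (pvLabel (max_speakers - 1))]) from by
            simp [pvAStep, hget, hlt],
            show pvBStep max_speakers m seg = m from by simp [pvBStep, hget, hlt],
            ih, pvGrow_full max_speakers rest m hlt]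
        simp [PySem.Dict.getD_eq_get?_getD, hget]

-- ===== VERDICT (by name: the statement is the Claim_ definition above) =====
theorem limit_speakers_py_spec : Claim_equal_limit_speakers_py := by
  intro segments max_speakers _
  unfold Spec_limit_speakers_py limit_speakers_py limit_speakers_py_alt
  split
  · rfl
  · simpa using pvLoop_eq max_speakers segments PySem.Dict.empty []
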